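-- pv_equiv track=rewrite | github.com/chiralcentre/Kattis | kemija08.py | kemija
-- ===== SOURCE A (Python) =====
-- def kemija(string):
--     vowels = ['a','e','i','o','u']
--     s2 = ''
--     while string:
--         char = string[0]
--         if char not in vowels:
--             s2 += char
--             string = string[1:]
--         else:
--             s2 += char
--             string = string[3:]
--     return s2
-- ===== SOURCE B (Python) =====
-- def kemija(string):
--     out = []
--     skip = 0
--     for char in string:
--         if skip > 0:
--             skip -= 1
--         else:
--             out.append(char)
--             if char in 'aeiou':
--                 skip = 2
--     return ''.join(out)
-- ===== Notes on version B (the rewrite author's own statement) =====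
-- stated objective: faster
-- what changed: Replaced A's while-loop that repeatedly slices the remaining string (advancing by 1 or 3) and grows the result by string += with a single uniform for-loop over every character carrying an explicit skip counter and a list accumulator joined once at the end.
import Mathlib
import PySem

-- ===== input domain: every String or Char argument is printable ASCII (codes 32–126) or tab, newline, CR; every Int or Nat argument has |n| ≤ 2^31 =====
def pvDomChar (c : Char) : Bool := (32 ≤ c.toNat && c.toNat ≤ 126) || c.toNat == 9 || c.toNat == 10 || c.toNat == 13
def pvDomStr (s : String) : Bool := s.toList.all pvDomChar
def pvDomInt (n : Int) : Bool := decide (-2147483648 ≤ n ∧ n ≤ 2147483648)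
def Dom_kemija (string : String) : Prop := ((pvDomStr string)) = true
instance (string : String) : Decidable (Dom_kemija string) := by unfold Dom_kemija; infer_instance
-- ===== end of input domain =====

-- B changes structure only: one uniform pass with a skip counter instead of A's slicing while-loop; same output.

-- ===== PORT A =====
-- A's while-loop: look at string[0]; non-vowel: append it, string = string[1:]; vowel: append it, string = string[3:].
def kemijaVowels : List Char := ['a', 'e', 'i', 'o', 'u']

def kemijaLoop (string : List Char) (s2 : List Char) : List Char :=
  match string with
  | [] => s2
  | char :: rest =>
    if char ∉ kemijaVowels then
      kemijaLoop rest (s2 ++ [char])          -- string = string[1:]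
    else
      kemijaLoop (rest.drop 2) (s2 ++ [char]) -- string = string[3:]
termination_by string.length
decreasing_by
  all_goals simp [List.length_drop]

def kemija (string : String) : String :=
  String.ofList (kemijaLoop string.toList [])

-- ===== PORT B =====
-- one step of B's for-loop: state = (accumulated output, skip counter)
def kemijaAltStep (st : List Char × Int) (char : Char) : List Char × Int :=
  if st.2 > 0 then (st.1, st.2 - 1)
  else (st.1 ++ [char], if char ∈ "aeiou".toList then 2 else 0)

def kemija_alt (string : String) : String :=
  String.ofList (string.toList.foldl kemijaAltStep ([], 0)).1

-- ===== PRECONDITION & SPEC =====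
def Spec_kemija (string : String) (out : String) : Prop := out = kemija_alt string
instance (string : String) (out : String) : Decidable (Spec_kemija string out) := by unfold Spec_kemija; infer_instance

-- ===== CLAIM (what is proved, stated in full; the proofs are below) =====
def Claim_equal_kemija : Prop := ∀ (string : String), Dom_kemija string → Spec_kemija string (kemija string)

-- ===== LEMMAS AND PROOFS =====

-- While B's skip counter is positive, it discards characters: folding from skip n ≥ 0
-- gives the same output component as folding over the list with the first n dropped, skip 0.
theorem kemijaAlt_skip (l : List Char) (acc : List Char) (n : Nat) :
    (l.foldl kemijaAltStep (acc, (n : Int))).1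
      = ((l.drop n).foldl kemijaAltStep (acc, 0)).1 := by
  induction l generalizing acc n with
  | nil => simp
  | cons c rest ih =>
    cases n with
    | zero => simp
    | succ m =>
      have h : kemijaAltStep (acc, ((m + 1 : Nat) : Int)) c = (acc, (m : Int)) := by
        simp only [kemijaAltStep]
        rw [if_pos (by push_cast; omega)]
        push_cast; ring_nf
      simp only [List.foldl_cons, h, List.drop_succ_cons]
      exact ih acc m

theorem kemija_vowels_eq : "aeiou".toList = kemijaVowels := by decide

theorem kemijaLoop_eq_foldl (l : List Char) (s2 : List Char) :
    kemijaLoop l s2 = (l.foldl kemijaAltStep (s2, 0)).1 := by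
  induction l, s2 using kemijaLoop.induct with
  | case1 s2 => rw [kemijaLoop]; simp
  | case2 s2 char rest hnv ih =>
    rw [kemijaLoop]
    simp only [hnv]
    rw [ih]
    have h : kemijaAltStep (s2, 0) char = (s2 ++ [char], 0) := by
      simp [kemijaAltStep, kemija_vowels_eq, hnv]
    simp [h]
  | case3 s2 char rest hv ih =>
    rw [kemijaLoop]
    rw [if_neg (by simpa using hv)]
    rw [ih]
    have h : kemijaAltStep (s2, 0) char = (s2 ++ [char], 2) := by
      simp [kemijaAltStep, kemija_vowels_eq, hv]
    have := kemijaAlt_skip rest (s2 ++ [char]) 2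
    simp only [List.foldl_cons, h]
    rw [← this]
    norm_num

-- ===== VERDICT (by name: the statement is the Claim_ definition above) =====
theorem kemija_spec : Claim_equal_kemija := by
  intro s _
  unfold Spec_kemija kemija kemija_alt
  rw [kemijaLoop_eq_foldl]
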